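-- pv_equiv track=rewrite | github.com/falcol/pyfml | exercises/ex5_10.py | solve
-- ===== SOURCE A (Python) =====
-- def solve(input_data):
--     result = None
--     numerator = 1
--     denominator = 1
--     """result = 2n! // (n!)^2"""
--     # Viết code vào đây set result làm kết quả của tính toán
--     for i in range(1, input_data * 2 + 1):
--         numerator = numerator * i
--     for i in range(1, input_data + 1):
--         denominator = denominator * i
--
--     result = numerator // (denominator ** 2)
--
--     return result
-- ===== SOURCE B (Python) =====
-- def solve(input_data):
--     result = 1
--     for i in range(1, input_data + 1):
--         result = result * (input_data + i) // i
--     return result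
-- ===== Notes on version B (the rewrite author's own statement) =====
-- stated objective: faster
-- what changed: Replaces the two full factorial products and one huge division by the incremental exact product C(2n,n)=prod_{i=1..n}(n+i)/i, whose intermediates are C(n+i,i) and stay the size of the answer.
import Mathlib
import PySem

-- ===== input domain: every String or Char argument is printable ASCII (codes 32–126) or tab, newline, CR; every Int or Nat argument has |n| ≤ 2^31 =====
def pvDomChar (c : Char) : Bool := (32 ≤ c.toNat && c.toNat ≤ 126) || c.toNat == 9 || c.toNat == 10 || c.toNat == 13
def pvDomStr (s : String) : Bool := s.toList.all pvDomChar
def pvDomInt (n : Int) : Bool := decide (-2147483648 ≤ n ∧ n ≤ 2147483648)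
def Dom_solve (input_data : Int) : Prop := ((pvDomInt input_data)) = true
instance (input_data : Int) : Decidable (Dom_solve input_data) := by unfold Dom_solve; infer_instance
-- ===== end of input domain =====

-- B replaces A's two full factorial products and one big division by the incremental exact
-- product C(2n,n)=∏_{i=1..n}(n+i)/i, keeping intermediates the size of the answer (objective: faster).


-- ===== PORT A =====
def solve (input_data : Int) : Int :=
  let numerator : Int :=
    (PySem.List.pyRange 1 (input_data * 2 + 1) 1).foldl (fun acc i => acc * i) 1
  let denominator : Int :=
    (PySem.List.pyRange 1 (input_data + 1) 1).foldl (fun acc i => acc * i) 1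
  PySem.Int.floordiv numerator (denominator ^ 2)

-- ===== PORT B =====
def solve_alt (input_data : Int) : Int :=
  (PySem.List.pyRange 1 (input_data + 1) 1).foldl
    (fun acc i => PySem.Int.floordiv (acc * (input_data + i)) i) 1

-- ===== PRECONDITION & SPEC =====
def Spec_solve (input_data : Int) (out : Int) : Prop := out = solve_alt input_data
instance (input_data : Int) (out : Int) : Decidable (Spec_solve input_data out) := by unfold Spec_solve; infer_instance

-- ===== CLAIM (what is proved, stated in full; the proofs are below) =====
def Claim_equal_solve : Prop := ∀ (input_data : Int), Dom_solve input_data → Spec_solve input_data (solve input_data)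

-- ===== LEMMAS AND PROOFS =====

-- A's factorial loop: the product of 1..k is k!.
theorem foldl_mul_pyRange_factorial (k : Nat) :
    (PySem.List.pyRange 1 ((k : Int) + 1) 1).foldl (fun acc i => acc * i) 1
      = (Nat.factorial k : Int) := by
  induction k with
  | zero => simp [PySem.List.pyRange_one_eq_nil, Nat.factorial]
  | succ k ih =>
      have h : (1 : Int) ≤ (k : Int) + 1 := by omega
      have := PySem.List.pyRange_one_succ_right (a := 1) (b := (k : Int) + 1) h
      push_cast
      rw [this, List.foldl_append, ih]
      simp [Nat.factorial_succ]
      ring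

-- B's loop invariant: after i = 1..k the accumulator is C(m+k, k).
theorem foldl_step_choose (m : Nat) (k : Nat) :
    (PySem.List.pyRange 1 ((k : Int) + 1) 1).foldl
        (fun acc i => PySem.Int.floordiv (acc * ((m : Int) + i)) i) 1
      = (Nat.choose (m + k) k : Int) := by
  induction k with
  | zero => simp [PySem.List.pyRange_one_eq_nil]
  | succ k ih =>
      have h : (1 : Int) ≤ (k : Int) + 1 := by omega
      have hsplit := PySem.List.pyRange_one_succ_right (a := 1) (b := (k : Int) + 1) h
      push_cast
      rw [hsplit, List.foldl_append, ih]
      simp only [List.foldl_cons, List.foldl_nil]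
      have hmul : ((m + k).choose k : Int) * ((m : Int) + ((k : Int) + 1))
          = (((m + (k + 1)).choose (k + 1) * (k + 1) : Nat) : Int) := by
        have hN : (m + k).choose k * (m + k + 1) = (m + (k + 1)).choose (k + 1) * (k + 1) := by
          rw [show m + (k + 1) = m + k + 1 from by omega, mul_comm]
          exact Nat.add_one_mul_choose_eq (m + k) k
        rw [← hN]
        push_cast
        ring
      rw [hmul]
      rw [show ((k : Int) + 1) = (((k + 1 : Nat)) : Int) by push_cast; ring]
      rw [PySem.Int.floordiv_natCast]
      rw [Nat.mul_div_cancel _ (Nat.succ_pos k)]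

-- A's value in closed form: exact division of (2m)! by (m!)^2 is C(2m, m).
theorem solve_closed (m : Nat) : solve (m : Int) = (Nat.choose (2 * m) m : Int) := by
  unfold solve
  have hnum : ((m : Int) * 2 + 1) = ((2 * m : Nat) : Int) + 1 := by push_cast; ring
  rw [hnum, foldl_mul_pyRange_factorial, foldl_mul_pyRange_factorial]
  have hfact : Nat.factorial (2 * m) = Nat.choose (2 * m) m * Nat.factorial m ^ 2 := by
    have h := Nat.choose_mul_factorial_mul_factorial (show m ≤ 2 * m by omega)
    have h2 : 2 * m - m = m := by omega
    rw [h2] at h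
    nlinarith [h]
  rw [hfact]
  push_cast
  rw [show ((Nat.factorial m : Int)) ^ 2 = (((Nat.factorial m ^ 2 : Nat)) : Int) by push_cast; ring]
  rw [show ((Nat.choose (2 * m) m : Int)) * ((Nat.factorial m ^ 2 : Nat) : Int)
        = (((Nat.choose (2 * m) m * Nat.factorial m ^ 2 : Nat)) : Int) by push_cast; ring]
  rw [PySem.Int.floordiv_natCast]
  rw [Nat.mul_div_cancel _ (by positivity)]

-- ===== VERDICT (by name: the statement is the Claim_ definition above) =====
theorem solve_spec : Claim_equal_solve := by
  intro n _
  unfold Spec_solve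
  by_cases hle : n ≤ 0
  · unfold solve solve_alt
    rw [PySem.List.pyRange_one_eq_nil (show n * 2 + 1 ≤ 1 by omega),
        PySem.List.pyRange_one_eq_nil (show n + 1 ≤ 1 by omega)]
    simp only [List.foldl_nil]
    decide
  · obtain ⟨m, rfl⟩ : ∃ m : Nat, n = (m : Int) := ⟨n.toNat, (Int.toNat_of_nonneg (by omega)).symm⟩
    rw [solve_closed]
    unfold solve_alt
    rw [foldl_step_choose m m]
    norm_num [two_mul]
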